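-- pv_equiv track=rewrite | github.com/bazelbuild/bazel | tools/objc/j2objc_dead_code_pruner.py | BuildReachableFileSet
-- ===== SOURCE A (Python) =====
-- def BuildReachableFileSet(entry_classes, reachability_tree, header_mapping):
--   """Builds a set of reachable translated files from entry Java classes.
--
--   Args:
--     entry_classes: A comma separated list of Java entry classes.
--     reachability_tree: A dict mapping translated files to their direct
--         dependencies.
--     header_mapping: A dict mapping Java class names to translated source files.
--   Returns:
--     A set of reachable translated files from the given list of entry classes.
--   Raises:
--     Exception: If there is an entry class that is not being transpiled in this
--         j2objc_library.
--   """
--   reachable_files = set()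
--   for entry_class in entry_classes.split(','):
--     if entry_class not in header_mapping:
--       raise Exception(entry_class +
--                       'is not in the transitive Java deps of included ' +
--                       'j2objc_library rules.')
--     transpiled_file_name = header_mapping[entry_class]
--     reachable_files.add(transpiled_file_name)
--     current_level_deps = reachability_tree[transpiled_file_name]
--     while current_level_deps:
--       next_level_deps = []
--       for dep in current_level_deps:
--         if dep not in reachable_files:
--           reachable_files.add(dep)
--           if dep in reachability_tree:
--             next_level_deps.extend(reachability_tree[dep])
--       current_level_deps = next_level_deps
--   return reachable_files
-- ===== SOURCE B (Python) =====
-- def BuildReachableFileSet(entry_classes, reachability_tree, header_mapping):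
--   """Flat FIFO-worklist reachability instead of level-synchronous BFS."""
--   reachable_files = set()
--   for entry_class in entry_classes.split(','):
--     if entry_class not in header_mapping:
--       raise Exception(entry_class +
--                       'is not in the transitive Java deps of included ' +
--                       'j2objc_library rules.')
--     transpiled_file_name = header_mapping[entry_class]
--     reachable_files.add(transpiled_file_name)
--     worklist = list(reachability_tree[transpiled_file_name])
--     while worklist:
--       dep = worklist.pop(0)
--       if dep not in reachable_files:
--         reachable_files.add(dep)
--         if dep in reachability_tree:
--           worklist.extend(reachability_tree[dep])
--   return reachable_files
-- ===== Notes on version B (the rewrite author's own statement) =====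
-- stated objective: simpler
-- what changed: Replaces the two-level frontier BFS (current_level_deps/next_level_deps with a nested for loop rebuilding the frontier each round) by one flat pop-driven FIFO worklist loop that visits deps in the same order.
import Mathlib
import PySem

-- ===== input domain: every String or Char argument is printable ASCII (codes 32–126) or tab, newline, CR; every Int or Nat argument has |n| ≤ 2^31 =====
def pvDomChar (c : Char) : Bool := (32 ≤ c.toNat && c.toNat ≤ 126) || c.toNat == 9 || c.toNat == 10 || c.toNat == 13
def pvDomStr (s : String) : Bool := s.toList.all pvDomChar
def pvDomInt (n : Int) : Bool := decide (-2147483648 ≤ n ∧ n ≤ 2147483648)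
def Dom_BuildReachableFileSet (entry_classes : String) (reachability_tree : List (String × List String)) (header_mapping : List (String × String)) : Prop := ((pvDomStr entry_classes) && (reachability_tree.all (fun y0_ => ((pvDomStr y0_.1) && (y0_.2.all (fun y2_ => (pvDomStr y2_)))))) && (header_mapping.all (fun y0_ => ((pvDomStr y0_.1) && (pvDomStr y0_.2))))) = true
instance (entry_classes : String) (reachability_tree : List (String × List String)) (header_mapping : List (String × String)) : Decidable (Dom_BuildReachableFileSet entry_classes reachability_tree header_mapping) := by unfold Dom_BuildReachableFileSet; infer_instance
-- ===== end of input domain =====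

-- B replaces A's two-level frontier BFS (current/next level lists) by one flat FIFO worklist loop;
-- same reachable set in the same insertion order (objective: simpler).


-- ===== PORT A =====

-- keys not yet in the reachable set: the termination measure both loops decrease
def pvMissing (tree : List (String × List String)) (r : PySem.Set String) : Nat :=
  ((tree.map Prod.fst).filter (fun k => !(PySem.Set.contains r k))).length

-- used by the termination proofs below (cited from decreasing_by, so they live above the ports)
theorem pvMissing_le (tree : List (String × List String)) (r r' : PySem.Set String)
    (h : ∀ x, PySem.Set.contains r x = true → PySem.Set.contains r' x = true) :
    pvMissing tree r' ≤ pvMissing tree r := by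
  apply List.Sublist.length_le
  apply List.monotone_filter_right
  intro k hk
  cases hr : PySem.Set.contains r k with
  | false => rfl
  | true => rw [h _ hr] at hk; exact absurd hk (by decide)

theorem pvMissing_lt (tree : List (String × List String)) (r r' : PySem.Set String)
    (h : ∀ x, PySem.Set.contains r x = true → PySem.Set.contains r' x = true)
    (d : String) (hd : d ∈ tree.map Prod.fst)
    (hdr : PySem.Set.contains r d = false) (hdr' : PySem.Set.contains r' d = true) :
    pvMissing tree r' < pvMissing tree r := by
  have hsub : ((tree.map Prod.fst).filter (fun k => !(PySem.Set.contains r' k))).Sublist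
      ((tree.map Prod.fst).filter (fun k => !(PySem.Set.contains r k))) := by
    apply List.monotone_filter_right
    intro k hk
    cases hr : PySem.Set.contains r k with
    | false => rfl
    | true => rw [h _ hr] at hk; exact absurd hk (by decide)
  rcases Nat.lt_or_ge (pvMissing tree r') (pvMissing tree r) with hlt | hge
  · exact hlt
  · exfalso
    have heq := hsub.eq_of_length (Nat.le_antisymm hsub.length_le hge)
    have hdin : d ∈ (tree.map Prod.fst).filter (fun k => !(PySem.Set.contains r k)) :=
      List.mem_filter.mpr ⟨hd, by rw [hdr]; rfl⟩
    rw [← heq] at hdin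
    have hthis := (List.mem_filter.mp hdin).2
    rw [hdr'] at hthis
    exact absurd hthis (by decide)

theorem pvContains_add_of (r : PySem.Set String) (x y : String)
    (h : PySem.Set.contains r y = true) : PySem.Set.contains (PySem.Set.add r x) y = true := by
  simp only [PySem.Set.add]
  split
  · exact h
  · simp only [PySem.Set.contains] at *
    simp at h ⊢
    exact Or.inl h

theorem pvContains_add_self (r : PySem.Set String) (x : String) :
    PySem.Set.contains (PySem.Set.add r x) x = true := by
  simp only [PySem.Set.add]
  split
  · assumption
  · simp only [PySem.Set.contains]
    simp

theorem pvContains_add_of_ne (r : PySem.Set String) (x y : String) (hne : y ≠ x) :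
    PySem.Set.contains (PySem.Set.add r x) y = PySem.Set.contains r y := by
  simp only [PySem.Set.add]
  split
  · rfl
  · simp only [PySem.Set.contains]
    simp [hne]

-- A's inner 'for dep in current_level_deps' loop: state (reachable_files, next_level_deps)
def pvStepA (tree : List (String × List String)) (r : PySem.Set String) (nx : List String) :
    List String → PySem.Set String × List String
  | [] => (r, nx)
  | d :: rest =>
    if PySem.Set.contains r d then pvStepA tree r nx rest
    else
      match (PySem.Dict.mk tree).get? d with
      | some ds => pvStepA tree (PySem.Set.add r d) (nx ++ ds) rest
      | none => pvStepA tree (PySem.Set.add r d) nx rest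

theorem pvStepA_mono (tree : List (String × List String)) :
    ∀ (cur : List String) (r : PySem.Set String) (nx : List String) (x : String),
      PySem.Set.contains r x = true → PySem.Set.contains (pvStepA tree r nx cur).1 x = true := by
  intro cur
  induction cur with
  | nil => intro r nx x h; simpa [pvStepA] using h
  | cons d rest ih =>
    intro r nx x h
    simp only [pvStepA]
    split
    · exact ih r nx x h
    · split
      · exact ih _ _ x (pvContains_add_of r d x h)
      · exact ih _ _ x (pvContains_add_of r d x h)

theorem pvKey_of_get?_some (tree : List (String × List String)) (d : String) (ds : List String)
    (h : (PySem.Dict.mk tree).get? d = some ds) : d ∈ tree.map Prod.fst := by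
  induction tree with
  | nil => simp [PySem.Dict.get?] at h
  | cons p rest ih =>
    rw [show (p :: rest) = ((p.1, p.2) :: rest) by simp] at h
    rw [PySem.Dict.get?_mk_cons] at h
    by_cases he : (p.1 == d) = true
    · rw [List.map_cons, ← eq_of_beq he]
      exact List.mem_cons_self
    · simp only [he] at h
      right
      exact ih (by simpa using h)

theorem pvGet?_isSome_of_key (tree : List (String × List String)) (d : String)
    (h : d ∈ tree.map Prod.fst) : ((PySem.Dict.mk tree).get? d).isSome = true := by
  induction tree with
  | nil => simp at h
  | cons p rest ih =>
    rw [show (p :: rest) = ((p.1, p.2) :: rest) by simp, PySem.Dict.get?_mk_cons]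
    by_cases he : (p.1 == d) = true
    · simp [he]
    · simp only [he, Bool.false_eq_true, if_false]
      apply ih
      simp only [List.map_cons, List.mem_cons] at h
      rcases h with h | h
      · exact absurd (by simp [h]) he
      · exact h

theorem pvStepA_witness (tree : List (String × List String)) :
    ∀ (cur : List String) (r : PySem.Set String),
      (pvStepA tree r [] cur).2 ≠ [] →
      ∃ d, d ∈ tree.map Prod.fst ∧ PySem.Set.contains r d = false ∧
        PySem.Set.contains (pvStepA tree r [] cur).1 d = true := by
  intro cur
  induction cur with
  | nil => intro r hne; exact absurd rfl hne
  | cons d rest ih =>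
    intro r h
    simp only [pvStepA] at *
    split at h
    · rcases ih r h with ⟨e, he, h1, h2⟩
      rename_i hc
      refine ⟨e, he, h1, ?_⟩
      simp only [hc, if_true]
      exact h2
    · rename_i hc
      split at h
      · rename_i ds hds
        refine ⟨d, pvKey_of_get?_some tree d ds hds, by simpa using hc, ?_⟩
        simp only [hc, Bool.false_eq_true, if_false]
        exact pvStepA_mono tree rest _ _ d (pvContains_add_self r d)
      · rename_i hds
        rcases ih (PySem.Set.add r d) h with ⟨e, he, h1, h2⟩
        refine ⟨e, he, ?_, ?_⟩
        · cases hre : PySem.Set.contains r e with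
          | false => rfl
          | true =>
            rw [pvContains_add_of r d e hre] at h1
            exact absurd h1 (by decide)
        · simp only [pvStepA, hc, Bool.false_eq_true, if_false, hds]
          exact h2

-- A's outer 'while current_level_deps' loop
def pvLoopA (tree : List (String × List String)) (r : PySem.Set String) (cur : List String) :
    PySem.Set String :=
  if h : cur = [] then r
  else
    pvLoopA tree (pvStepA tree r [] cur).1 (pvStepA tree r [] cur).2
termination_by 2 * pvMissing tree r + (if cur = [] then 0 else 1)
decreasing_by
  have hmono := pvStepA_mono tree cur r []
  by_cases hnx : (pvStepA tree r [] cur).2 = []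
  · have := pvMissing_le tree r (pvStepA tree r [] cur).1 (fun x => hmono x)
    simp [hnx, h]
    omega
  · rcases pvStepA_witness tree cur r hnx with ⟨d, hd, h1, h2⟩
    have := pvMissing_lt tree r (pvStepA tree r [] cur).1 (fun x => hmono x) d hd h1 h2
    simp [hnx, h]
    omega

def BuildReachableFileSet (entry_classes : String) (reachability_tree : List (String × List String)) (header_mapping : List (String × String)) : List String :=
  ((PySem.Str.split? entry_classes ",").getD []).foldl
    (fun r e =>
      match (PySem.Dict.mk header_mapping).get? e with
      | none => r          -- Python raises Exception here: excluded by Pre_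
      | some f =>
        let r1 := PySem.Set.add r f
        match (PySem.Dict.mk reachability_tree).get? f with
        | none => r1       -- Python raises KeyError here: excluded by Pre_
        | some cur => pvLoopA reachability_tree r1 cur)
    PySem.Set.empty

-- ===== PORT B =====

-- B's single flat FIFO worklist loop
def pvLoopQ (tree : List (String × List String)) (r : PySem.Set String) (queue : List String) :
    PySem.Set String :=
  match queue with
  | [] => r
  | d :: rest =>
    if hc : PySem.Set.contains r d = true then pvLoopQ tree r rest
    else
      match hds : (PySem.Dict.mk tree).get? d with
      | some ds => pvLoopQ tree (PySem.Set.add r d) (rest ++ ds)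
      | none => pvLoopQ tree (PySem.Set.add r d) rest
termination_by (pvMissing tree r, queue.length)
decreasing_by
  · exact Prod.Lex.right _ (by simp)
  · apply Prod.Lex.left
    exact pvMissing_lt tree r _ (fun x => pvContains_add_of r d x)
      d (pvKey_of_get?_some tree d ds hds) (by simpa using hc) (pvContains_add_self r d)
  · have hkey : d ∉ tree.map Prod.fst := by
      intro hmem
      have hsome := pvGet?_isSome_of_key tree d hmem
      simp [hds] at hsome
    have heq : pvMissing tree (PySem.Set.add r d) = pvMissing tree r := by
      unfold pvMissing
      congr 1
      apply List.filter_congr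
      intro k hk
      rw [pvContains_add_of_ne r d k (by rintro rfl; exact hkey hk)]
    rw [heq]
    exact Prod.Lex.right _ (by simp)

def BuildReachableFileSet_alt (entry_classes : String) (reachability_tree : List (String × List String)) (header_mapping : List (String × String)) : List String :=
  ((PySem.Str.split? entry_classes ",").getD []).foldl
    (fun r e =>
      match (PySem.Dict.mk header_mapping).get? e with
      | none => r          -- Python raises Exception here: excluded by Pre_
      | some f =>
        let r1 := PySem.Set.add r f
        match (PySem.Dict.mk reachability_tree).get? f with
        | none => r1       -- Python raises KeyError here: excluded by Pre_
        | some cur => pvLoopQ reachability_tree r1 cur)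
    PySem.Set.empty

-- ===== PRECONDITION & SPEC =====
-- Pre_ excludes exactly the inputs where the Python raises: an entry class missing from
-- header_mapping (explicit Exception) or whose translated file is missing from
-- reachability_tree (KeyError). B raises identically there.
def Pre_BuildReachableFileSet (entry_classes : String) (reachability_tree : List (String × List String)) (header_mapping : List (String × String)) : Prop :=
  ∀ e ∈ (PySem.Str.split? entry_classes ",").getD [],
    (((PySem.Dict.mk header_mapping).get? e).bind
      (fun f => (PySem.Dict.mk reachability_tree).get? f)).isSome = true
instance (entry_classes : String) (reachability_tree : List (String × List String)) (header_mapping : List (String × String)) : Decidable (Pre_BuildReachableFileSet entry_classes reachability_tree header_mapping) := by unfold Pre_BuildReachableFileSet; infer_instance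

def pvWitness_BuildReachableFileSet : String × (List (String × List String)) × (List (String × String)) :=
  ("Foo,Bar", [("foo.h", ["dep.h"]), ("bar.h", [])], [("Foo", "foo.h"), ("Bar", "bar.h")])

def Spec_BuildReachableFileSet (entry_classes : String) (reachability_tree : List (String × List String)) (header_mapping : List (String × String)) (out : List String) : Prop := out = BuildReachableFileSet_alt entry_classes reachability_tree header_mapping
instance (entry_classes : String) (reachability_tree : List (String × List String)) (header_mapping : List (String × String)) (out : List String) : Decidable (Spec_BuildReachableFileSet entry_classes reachability_tree header_mapping out) := by unfold Spec_BuildReachableFileSet; infer_instance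

-- ===== CLAIM (what is proved, stated in full; the proofs are below) =====
def Claim_equal_BuildReachableFileSet : Prop := ∀ (entry_classes : String) (reachability_tree : List (String × List String)) (header_mapping : List (String × String)), Dom_BuildReachableFileSet entry_classes reachability_tree header_mapping → Pre_BuildReachableFileSet entry_classes reachability_tree header_mapping → Spec_BuildReachableFileSet entry_classes reachability_tree header_mapping (BuildReachableFileSet entry_classes reachability_tree header_mapping)

-- ===== LEMMAS AND PROOFS =====

-- accumulator lemma for pvStepA (used by the simulation lemma below)
theorem pvStepA_acc (tree : List (String × List String)) :
    ∀ (cur : List String) (r : PySem.Set String) (nx : List String),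
      pvStepA tree r nx cur = ((pvStepA tree r [] cur).1, nx ++ (pvStepA tree r [] cur).2) := by
  intro cur
  induction cur with
  | nil => intro r nx; simp [pvStepA]
  | cons d rest ih =>
    intro r nx
    simp only [pvStepA]
    split
    · exact ih r nx
    · split
      · rename_i ds hds
        simp only [List.nil_append]
        rw [ih _ (nx ++ ds), ih _ ds]
        simp
      · exact ih _ nx

-- key simulation: the FIFO queue processes a frontier exactly like one level-round of A
theorem pvLoopQ_step (tree : List (String × List String)) :
    ∀ (cur : List String) (r : PySem.Set String) (qtail : List String),
      pvLoopQ tree r (cur ++ qtail)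
        = pvLoopQ tree (pvStepA tree r [] cur).1 (qtail ++ (pvStepA tree r [] cur).2) := by
  intro cur
  induction cur with
  | nil => intro r qtail; simp [pvStepA]
  | cons d rest ih =>
    intro r qtail
    simp only [List.cons_append, pvLoopQ, pvStepA, List.nil_append]
    split
    · exact ih r qtail
    · split
      · rename_i ds hds
        rw [hds, List.append_assoc, ih (PySem.Set.add r d) (qtail ++ ds)]
        show pvLoopQ tree (pvStepA tree (PySem.Set.add r d) [] rest).1
            ((qtail ++ ds) ++ (pvStepA tree (PySem.Set.add r d) [] rest).2)
          = pvLoopQ tree (pvStepA tree (PySem.Set.add r d) ds rest).1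
            (qtail ++ (pvStepA tree (PySem.Set.add r d) ds rest).2)
        rw [pvStepA_acc tree rest (PySem.Set.add r d) ds]
        simp
      · rename_i hds
        rw [hds]
        exact ih (PySem.Set.add r d) qtail

theorem pvLoopA_eq_pvLoopQ (tree : List (String × List String))
    (r : PySem.Set String) (cur : List String) :
    pvLoopA tree r cur = pvLoopQ tree r cur := by
  induction r, cur using pvLoopA.induct tree with
  | case1 r => simp [pvLoopA, pvLoopQ]
  | case2 r cur h ih =>
    rw [pvLoopA]
    simp only [h, dite_false]
    rw [ih]
    have hstep := pvLoopQ_step tree cur r []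
    simp only [List.append_nil, List.nil_append] at hstep
    exact hstep.symm

-- ===== VERDICT (by name: the statement is the Claim_ definition above) =====
theorem BuildReachableFileSet_spec : Claim_equal_BuildReachableFileSet := by
  intro ec tree hm _ _
  unfold Spec_BuildReachableFileSet BuildReachableFileSet BuildReachableFileSet_alt
  congr 1
  funext r e
  cases (PySem.Dict.mk hm).get? e with
  | none => rfl
  | some f =>
    simp only
    cases (PySem.Dict.mk tree).get? f with
    | none => rfl
    | some cur => exact pvLoopA_eq_pvLoopQ tree _ cur
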